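-- pv_equiv track=rewrite | github.com/kevinkorfmann/smckit | src/smckit/tl/_smcpp.py | _bin_onepop_observations
-- ===== SOURCE A (Python) =====
-- def _unpack_observation(
--     obs: tuple[int, ...],
--     default_n_undist: int,
-- ) -> tuple[int, int, int, int]:
--     if len(obs) == 3:
--         span, a_obs, b_obs = obs
--         return int(span), int(a_obs), int(b_obs), int(default_n_undist if b_obs >= 0 else 0)
--     if len(obs) == 4:
--         span, a_obs, b_obs, n_obs = obs
--         return int(span), int(a_obs), int(b_obs), int(n_obs)
--     raise ValueError("SMC++ observations must be (span, a, b) or (span, a, b, n)")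
--
-- def _process_onepop_bin(rows: list[tuple[int, int, int, int]]) -> tuple[int, int, int, int]:
--     max_sample_size = -2
--     best = rows[0]
--     for row in rows:
--         span, a_obs, _b_obs, n_obs = row
--         if span <= 0:
--             continue
--         sample_size = n_obs + (2 if a_obs >= 0 else 0)
--         seg = max(0, a_obs)
--         if sample_size > max_sample_size:
--             best = row
--             max_sample_size = sample_size
--         if max_sample_size == 2 and seg == 1:
--             best = row
--     return 1, best[1], best[2], best[3]
--
-- def _bin_onepop_observations(
--     observations: list[tuple[int, ...]],
--     width: int,
--     default_n_undist: int,
-- ) -> list[tuple[int, int, int, int]]: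
--     rows = [_unpack_observation(obs, default_n_undist) for obs in observations]
--     ret: list[tuple[int, int, int, int]] = []
--     i = 0
--     j = 0
--     seen = 0
--     while j < len(rows):
--         span = rows[j][0]
--         if seen + span > width:
--             left = width - seen
--             curr = rows[j]
--             rows[j] = (left, curr[1], curr[2], curr[3])
--             ret.append(_process_onepop_bin(rows[i : j + 1]))
--             rows[j] = (span - left, curr[1], curr[2], curr[3])
--             seen = 0
--             i = j
--         else:
--             j += 1
--             seen += span
--     if j > 0:
--         ret.append(_process_onepop_bin(rows[i:j]))
--     return ret
-- ===== SOURCE B (Python) =====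
-- def _unpack_observation(
--     obs: tuple[int, ...],
--     default_n_undist: int,
-- ) -> tuple[int, int, int, int]:
--     if len(obs) == 3:
--         span, a_obs, b_obs = obs
--         return int(span), int(a_obs), int(b_obs), int(default_n_undist if b_obs >= 0 else 0)
--     if len(obs) == 4:
--         span, a_obs, b_obs, n_obs = obs
--         return int(span), int(a_obs), int(b_obs), int(n_obs)
--     raise ValueError("SMC++ observations must be (span, a, b) or (span, a, b, n)")
--
-- def _process_onepop_bin(rows: list[tuple[int, int, int, int]]) -> tuple[int, int, int, int]:
--     max_sample_size = -2
--     best = rows[0]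
--     for row in rows:
--         span, a_obs, _b_obs, n_obs = row
--         if span <= 0:
--             continue
--         sample_size = n_obs + (2 if a_obs >= 0 else 0)
--         seg = max(0, a_obs)
--         if sample_size > max_sample_size:
--             best = row
--             max_sample_size = sample_size
--         if max_sample_size == 2 and seg == 1:
--             best = row
--     return 1, best[1], best[2], best[3]
--
-- def _bin_onepop_observations(
--     observations: list[tuple[int, ...]],
--     width: int,
--     default_n_undist: int,
-- ) -> list[tuple[int, int, int, int]]:
--     # Single forward pass building explicit bin sublists; no shared mutable
--     # row array, no index arithmetic, no overlapping-window slices.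
--     rows = [_unpack_observation(obs, default_n_undist) for obs in observations]
--     ret: list[tuple[int, int, int, int]] = []
--     current_bin: list[tuple[int, int, int, int]] = []
--     seen = 0
--     for span, a_obs, b_obs, n_obs in rows:
--         while seen + span > width:
--             left = width - seen
--             current_bin.append((left, a_obs, b_obs, n_obs))
--             ret.append(_process_onepop_bin(current_bin))
--             current_bin = []
--             seen = 0
--             span -= left
--         current_bin.append((span, a_obs, b_obs, n_obs))
--         seen += span
--     if current_bin:
--         ret.append(_process_onepop_bin(current_bin))
--     return ret
-- ===== Notes on version B (the rewrite author's own statement) =====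
-- stated objective: alternative
-- what changed: replaced the two-pointer pass that mutates a shared row array and slices overlapping windows (i/j indices, rows[j] rewritten twice per split) with a single forward pass that accumulates explicit bin sublists (for-loop with an inner splitting while); helpers _unpack_observation/_process_onepop_bin unchanged
import Mathlib
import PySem

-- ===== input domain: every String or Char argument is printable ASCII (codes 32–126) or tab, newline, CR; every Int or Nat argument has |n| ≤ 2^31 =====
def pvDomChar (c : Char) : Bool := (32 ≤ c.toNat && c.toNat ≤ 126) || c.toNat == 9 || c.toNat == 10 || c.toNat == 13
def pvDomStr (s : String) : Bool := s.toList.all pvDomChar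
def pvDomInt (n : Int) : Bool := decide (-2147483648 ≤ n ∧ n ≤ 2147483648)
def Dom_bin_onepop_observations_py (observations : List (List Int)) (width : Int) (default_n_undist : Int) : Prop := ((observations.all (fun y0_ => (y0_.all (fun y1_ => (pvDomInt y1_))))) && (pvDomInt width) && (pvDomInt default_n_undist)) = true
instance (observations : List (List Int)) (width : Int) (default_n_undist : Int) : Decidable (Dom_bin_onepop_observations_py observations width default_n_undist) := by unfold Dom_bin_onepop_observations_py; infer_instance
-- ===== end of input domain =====

-- B replaces A's two-pointer pass over a mutated shared row array (indices i/j, rows[j]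
-- rewritten twice per split, overlapping slices) by a single forward pass that accumulates
-- explicit bin sublists; same return value on Pre_ (alternative decomposition, no speed claim).


-- ===== PORT A =====
-- shared module helper _unpack_observation; the catch-all case is where Python raises
-- ValueError (excluded by Pre_)
def unpackObs (obs : List Int) (dn : Int) : Int × Int × Int × Int :=
  match obs with
  | [span, a, b] => (span, a, b, if 0 ≤ b then dn else 0)
  | [span, a, b, n] => (span, a, b, n)
  | _ => (0, 0, 0, 0)

-- shared module helper _process_onepop_bin; rows[0] is headD (both programs only call it
-- on non-empty bins)
def processBin (rows : List (Int × Int × Int × Int)) : Int × Int × Int × Int :=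
  let p := rows.foldl (fun acc row =>
    if row.1 ≤ 0 then acc
    else
      let s := row.2.2.2 + (if 0 ≤ row.2.1 then (2 : Int) else 0)
      let seg := max 0 row.2.1
      let q := if s > acc.2 then (row, s) else acc
      if q.2 = 2 ∧ seg = 1 then (row, q.2) else q) (rows.headD (0, 0, 0, 0), (-2 : Int))
  (1, p.1.2.1, p.1.2.2.1, p.1.2.2.2)

-- A's while loop; fuel only makes the recursion total (Python's while is unbounded; the
-- fuel passed below is proved sufficient on Pre_).  rows[i:j+1] with 0 ≤ i ≤ j < len is
-- exactly (rows.drop i).take (j+1-i).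
def aLoop (width : Int) : Nat → List (Int × Int × Int × Int) → List (Int × Int × Int × Int) → Nat → Nat → Int → List (Int × Int × Int × Int)
  | 0, _, ret, _, _, _ => ret
  | fuel + 1, rows, ret, i, j, seen =>
    if j < rows.length then
      let curr := rows.getD j (0, 0, 0, 0)
      let span := curr.1
      if seen + span > width then
        let left := width - seen
        let rows1 := rows.set j (left, curr.2.1, curr.2.2.1, curr.2.2.2)
        let ret1 := ret ++ [processBin ((rows1.drop i).take (j + 1 - i))]
        let rows2 := rows1.set j (span - left, curr.2.1, curr.2.2.1, curr.2.2.2)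
        aLoop width fuel rows2 ret1 j j 0
      else
        aLoop width fuel rows ret i (j + 1) (seen + span)
    else
      if 0 < j then ret ++ [processBin ((rows.drop i).take (j - i))] else ret

def bin_onepop_observations_py (observations : List (List Int)) (width : Int) (default_n_undist : Int) : List (Int × Int × Int × Int) :=
  let rows := observations.map (fun o => unpackObs o default_n_undist)
  -- fuel: at least the number of while-iterations on any input in Pre_ (lemma sim_lemma)
  let fuel := rows.foldl (fun acc r => acc + r.1.natAbs + 2) 1
  aLoop width fuel rows [] 0 0 0

-- ===== PORT B =====
-- B's inner splitting while loop (fuel only for totality; proved sufficient on Pre_)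
def bInner (width : Int) : Nat → Int → Int → Int → Int → List (Int × Int × Int × Int) → Int → List (Int × Int × Int × Int) → List (Int × Int × Int × Int) × List (Int × Int × Int × Int) × Int
  | 0, _, _, _, _, bin, seen, ret => (ret, bin, seen)
  | fuel + 1, span, a, b, n, bin, seen, ret =>
    if seen + span > width then
      let left := width - seen
      let bin1 := bin ++ [(left, a, b, n)]
      let ret1 := ret ++ [processBin bin1]
      bInner width fuel (span - left) a b n [] 0 ret1
    else
      (ret, bin ++ [(span, a, b, n)], seen + span)

-- B's for-loop over the unpacked rows
def bOuter (width : Int) : List (Int × Int × Int × Int) → List (Int × Int × Int × Int) → Int → List (Int × Int × Int × Int) → List (Int × Int × Int × Int) × List (Int × Int × Int × Int)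
  | [], bin, _, ret => (ret, bin)
  | r :: rest, bin, seen, ret =>
    let p := bInner width (r.1.natAbs + 2) r.1 r.2.1 r.2.2.1 r.2.2.2 bin seen ret
    bOuter width rest p.2.1 p.2.2 p.1

def bin_onepop_observations_py_alt (observations : List (List Int)) (width : Int) (default_n_undist : Int) : List (Int × Int × Int × Int) :=
  let rows := observations.map (fun o => unpackObs o default_n_undist)
  let p := bOuter width rows [] 0 []
  if p.2.isEmpty then p.1 else p.1 ++ [processBin p.2]

-- ===== PRECONDITION & SPEC =====
-- checks that no bin ever overflows (every running prefix sum of spans stays ≤ width)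
def noSplitSpansB (width : Int) : Int → List (List Int) → Bool
  | _, [] => true
  | seen, o :: rest => decide (seen + o.headD 0 ≤ width) && noSplitSpansB width (seen + o.headD 0) rest

-- Pre_ excludes exactly (1) rows whose length is not 3 or 4, on which Python raises
-- ValueError, and (2) inputs with width ≤ 0 on which some bin overflows, on which A's
-- while loop never terminates (each split leaves the remaining span > width forever).
def Pre_bin_onepop_observations_py (observations : List (List Int)) (width : Int) (default_n_undist : Int) : Prop :=
  (∀ o ∈ observations, o.length = 3 ∨ o.length = 4) ∧
  (0 < width ∨ noSplitSpansB width 0 observations = true)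

instance (observations : List (List Int)) (width : Int) (default_n_undist : Int) : Decidable (Pre_bin_onepop_observations_py observations width default_n_undist) := by
  unfold Pre_bin_onepop_observations_py; infer_instance

def pvWitness_bin_onepop_observations_py : List (List Int) × Int × Int := ([[3, 0, 1], [2, 1, 0, 4]], 4, 2)

def Spec_bin_onepop_observations_py (observations : List (List Int)) (width : Int) (default_n_undist : Int) (out : List (Int × Int × Int × Int)) : Prop := out = bin_onepop_observations_py_alt observations width default_n_undist
instance (observations : List (List Int)) (width : Int) (default_n_undist : Int) (out : List (Int × Int × Int × Int)) : Decidable (Spec_bin_onepop_observations_py observations width default_n_undist out) := by unfold Spec_bin_onepop_observations_py; infer_instance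

-- ===== CLAIM (what is proved, stated in full; the proofs are below) =====
def Claim_equal_bin_onepop_observations_py : Prop := ∀ (observations : List (List Int)) (width : Int) (default_n_undist : Int), Dom_bin_onepop_observations_py observations width default_n_undist → Pre_bin_onepop_observations_py observations width default_n_undist → Spec_bin_onepop_observations_py observations width default_n_undist (bin_onepop_observations_py observations width default_n_undist)

-- ===== LEMMAS AND PROOFS =====

-- fuel accounting: cost of finishing the row currently in hand, and of the remaining rows
def costRow (width span seen : Int) : Nat := span.natAbs + 1 + (if seen = width then 1 else 0)

def costRows (rows : List (Int × Int × Int × Int)) : Nat :=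
  (rows.map (fun r => r.1.natAbs + 2)).sum

-- Prop version of noSplitSpansB on unpacked rows
def noSplitFrom (width : Int) : Int → List (Int × Int × Int × Int) → Prop
  | _, [] => True
  | seen, r :: rs => seen + r.1 ≤ width ∧ noSplitFrom width (seen + r.1) rs

def bFinish (p : List (Int × Int × Int × Int) × List (Int × Int × Int × Int)) : List (Int × Int × Int × Int) :=
  if p.2.isEmpty then p.1 else p.1 ++ [processBin p.2]

lemma getD_at {α : Type} (xs : List α) (y : α) (ys : List α) (d : α) :
    (xs ++ y :: ys).getD xs.length d = y := by
  induction xs with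
  | nil => rfl
  | cons x xs ih => simpa using ih

lemma set_at {α : Type} (xs : List α) (y : α) (ys : List α) (v : α) :
    (xs ++ y :: ys).set xs.length v = xs ++ v :: ys := by
  induction xs with
  | nil => rfl
  | cons x xs ih => simpa using ih

lemma take_at_succ {α : Type} (xs : List α) (y : α) (ys : List α) :
    (xs ++ y :: ys).take (xs.length + 1) = xs ++ [y] := by
  induction xs with
  | nil => rfl
  | cons x xs ih => simpa using ih

lemma drop_at {α : Type} (xs ys : List α) : (xs ++ ys).drop xs.length = ys := by
  induction xs with
  | nil => rfl
  | cons x xs ih => simpa using ih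

lemma foldl_cost (rows : List (Int × Int × Int × Int)) (n : Nat) :
    rows.foldl (fun acc r => acc + r.1.natAbs + 2) n
      = n + (rows.map (fun r => r.1.natAbs + 2)).sum := by
  induction rows generalizing n with
  | nil => simp
  | cons r rs ih => simp [List.foldl, ih]; omega

lemma unpack_span (o : List Int) (dn : Int) (h : o.length = 3 ∨ o.length = 4) :
    (unpackObs o dn).1 = o.headD 0 := by
  rcases o with _ | ⟨s, _ | ⟨a, _ | ⟨b, _ | ⟨n, _ | ⟨m, t⟩⟩⟩⟩⟩ <;> simp_all [unpackObs]

lemma noSplit_bridge (width dn : Int) :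
    ∀ (obs : List (List Int)) (seen : Int),
      (∀ o ∈ obs, o.length = 3 ∨ o.length = 4) →
      noSplitSpansB width seen obs = true →
      noSplitFrom width seen (obs.map (fun o => unpackObs o dn)) := by
  intro obs
  induction obs with
  | nil => intro seen _ _; trivial
  | cons o rest ih =>
    intro seen hlen hns
    simp only [noSplitSpansB, Bool.and_eq_true, decide_eq_true_eq] at hns
    have hsp := unpack_span o dn (hlen o (by simp))
    refine ⟨by rw [hsp]; exact hns.1, ?_⟩
    rw [hsp]
    exact ih (seen + o.headD 0) (fun x hx => hlen x (by simp [hx])) hns.2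

lemma getD_mid {α : Type} (pre bin : List α) (r : α) (L : List α) (d : α) :
    (pre ++ bin ++ r :: L).getD (pre.length + bin.length) d = r := by
  have := getD_at (pre ++ bin) r L d
  simpa using this

lemma set_mid {α : Type} (pre bin : List α) (r v : α) (L : List α) :
    (pre ++ bin ++ r :: L).set (pre.length + bin.length) v = pre ++ bin ++ v :: L := by
  have := set_at (pre ++ bin) r L v
  simpa using this

lemma slice_mid {α : Type} (pre bin : List α) (r : α) (L : List α) :
    ((pre ++ bin ++ r :: L).drop pre.length).take (pre.length + bin.length + 1 - pre.length)
      = bin ++ [r] := by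
  have h1 : pre ++ bin ++ r :: L = pre ++ (bin ++ r :: L) := by simp
  have h2 : pre.length + bin.length + 1 - pre.length = bin.length + 1 := by omega
  rw [h1, drop_at, h2, take_at_succ]

lemma aLoop_advance (width : Int) (fa : Nat) (rows ret : List (Int × Int × Int × Int))
    (i j : Nat) (seen : Int) (hj : j < rows.length)
    (hs : ¬ (seen + (rows.getD j (0, 0, 0, 0)).1 > width)) :
    aLoop width (fa + 1) rows ret i j seen
      = aLoop width fa rows ret i (j + 1) (seen + (rows.getD j (0, 0, 0, 0)).1) := by
  simp only [aLoop, if_pos hj, if_neg hs]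

lemma aLoop_exit (width : Int) (fa : Nat) (hfa : 0 < fa) (pre bin : List (Int × Int × Int × Int))
    (r : Int × Int × Int × Int) (ret : List (Int × Int × Int × Int)) (seen : Int) :
    aLoop width fa (pre ++ bin ++ [r]) ret pre.length (pre.length + bin.length + 1) seen
      = ret ++ [processBin (bin ++ [r])] := by
  obtain ⟨k, rfl⟩ : ∃ k, fa = k + 1 := ⟨fa - 1, by omega⟩
  have hng : ¬ (pre.length + bin.length + 1 < (pre ++ bin ++ [r]).length) := by
    simp; omega
  simp only [aLoop]
  rw [if_neg hng, if_pos (by omega), slice_mid]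

lemma costRow_ge_one (width span seen : Int) : 1 ≤ costRow width span seen := by
  unfold costRow; split <;> omega

lemma costRow_le (width span seen : Int) : costRow width span seen ≤ span.natAbs + 2 := by
  unfold costRow; split <;> omega

-- the simulation: A's loop from state (rows = pre ++ bin ++ row :: rest, i = |pre|,
-- j = |pre|+|bin|) equals B's inner loop on the row in hand followed by B's outer loop,
-- provided both fuels cover the remaining iterations.
lemma sim_lemma (width : Int) :
    ∀ (fa fb : Nat) (span a b n : Int)
      (rest pre bin : List (Int × Int × Int × Int)) (seen : Int) (ret : List (Int × Int × Int × Int)),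
      ((1 ≤ width ∧ seen ≤ width) ∨ noSplitFrom width seen ((span, a, b, n) :: rest)) →
      costRow width span seen + costRows rest < fa →
      costRow width span seen ≤ fb →
      aLoop width fa (pre ++ bin ++ (span, a, b, n) :: rest) ret pre.length (pre.length + bin.length) seen
        = bFinish (let p := bInner width fb span a b n bin seen ret; bOuter width rest p.2.1 p.2.2 p.1) := by
  intro fa
  induction fa with
  | zero => intro fb span a b n rest pre bin seen ret _ hfa _; omega
  | succ fa ih =>
    intro fb span a b n rest pre bin seen ret hinv hfa hfb
    obtain ⟨fb', rfl⟩ : ∃ k, fb = k + 1 :=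
      ⟨fb - 1, by have := costRow_ge_one width span seen; omega⟩
    have hjlt : pre.length + bin.length
        < (pre ++ bin ++ (span, a, b, n) :: rest).length := by
      simp
    by_cases hsp : seen + span > width
    · -- split step on both sides
      have hws : 1 ≤ width ∧ seen ≤ width := by
        rcases hinv with h | h
        · exact h
        · have : seen + span ≤ width := h.1
          omega
      have hcost : costRow width (span - (width - seen)) 0 + 1 ≤ costRow width span seen := by
        unfold costRow
        split <;> split <;> omega
      have hih := ih fb' (span - (width - seen)) a b n rest (pre ++ bin) [] 0
        (ret ++ [processBin (bin ++ [(width - seen, a, b, n)])])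
        (Or.inl ⟨hws.1, by omega⟩) (by omega) (by omega)
      simp only [aLoop, if_pos hjlt, getD_mid, set_mid, slice_mid, if_pos hsp]
      simp only [bInner, if_pos hsp]
      simpa using hih
    · -- the row fits: B exits its inner loop, A advances j
      have hle : seen + span ≤ width := by omega
      cases rest with
      | nil =>
        -- last row: A exits the while loop and processes rows[i:j], B processes current_bin
        obtain ⟨fa', rfl⟩ : ∃ k, fa = k + 1 :=
          ⟨fa - 1, by have := costRow_ge_one width span seen; omega⟩
        have hgd : ((pre ++ bin ++ [(span, a, b, n)]).getD (pre.length + bin.length) (0, 0, 0, 0))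
            = (span, a, b, n) := getD_mid pre bin _ _ _
        rw [aLoop_advance _ _ _ _ _ _ _ hjlt (by rw [hgd]; exact hsp)]
        simp only [hgd]
        rw [aLoop_exit _ _ (Nat.succ_pos fa')]
        simp [bInner, if_neg hsp, bOuter, bFinish]
      | cons r rest' =>
        rcases r with ⟨s2, a2, b2, n2⟩
        have hinv' : (1 ≤ width ∧ seen + span ≤ width) ∨
            noSplitFrom width (seen + span) ((s2, a2, b2, n2) :: rest') := by
          rcases hinv with h | h
          · exact Or.inl ⟨h.1, hle⟩
          · exact Or.inr h.2
        have hco : costRows ((s2, a2, b2, n2) :: rest') = (s2.natAbs + 2) + costRows rest' := by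
          simp [costRows]
        have h1 := costRow_ge_one width span seen
        have h2 := costRow_le width s2 (seen + span)
        have hih := ih (s2.natAbs + 2) s2 a2 b2 n2 rest' pre (bin ++ [(span, a, b, n)])
          (seen + span) ret hinv' (by omega) (by omega)
        simp only [aLoop, if_pos hjlt, getD_mid, if_neg hsp]
        simp only [bInner, if_neg hsp]
        simp only [bOuter]
        simpa [Nat.add_assoc] using hih

-- ===== VERDICT =====
theorem bin_onepop_observations_py_spec : Claim_equal_bin_onepop_observations_py := by
  intro obs width dn _hdom hpre
  unfold Spec_bin_onepop_observations_py
  obtain ⟨hlen, hdisj⟩ := hpre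
  cases obs with
  | nil => rfl
  | cons o rest =>
    rcases hu : unpackObs o dn with ⟨s, a, b, n⟩
    have hinv : (1 ≤ width ∧ (0 : Int) ≤ width) ∨
        noSplitFrom width 0 ((s, a, b, n) :: rest.map (fun x => unpackObs x dn)) := by
      rcases hdisj with h | h
      · exact Or.inl ⟨by omega, by omega⟩
      · refine Or.inr ?_
        have := noSplit_bridge width dn (o :: rest) 0 hlen h
        simpa [hu] using this
    have h2 := costRow_le width s 0
    have hfa : costRow width s 0 + costRows (rest.map (fun o => unpackObs o dn))
        < (rest.map (fun o => unpackObs o dn)).foldl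
            (fun acc r => acc + r.1.natAbs + 2) (1 + s.natAbs + 2) := by
      rw [foldl_cost]
      simp only [costRows]
      omega
    have hsim := sim_lemma width
      ((rest.map (fun o => unpackObs o dn)).foldl
        (fun acc r => acc + r.1.natAbs + 2) (1 + s.natAbs + 2)) (s.natAbs + 2)
      s a b n (rest.map (fun o => unpackObs o dn)) [] [] 0 [] hinv hfa (by omega)
    unfold bin_onepop_observations_py bin_onepop_observations_py_alt
    simp only [List.map_cons, List.foldl_cons, hu]
    simp only [bOuter]
    simpa [bFinish] using hsim
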